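-- pv_equiv track=rewrite | github.com/rayhanhanaputra/diffattack-sfn | testMixColRow.py | mixRows
-- ===== SOURCE A (Python) =====
-- def multiplyGF16(a,b): #return the value of multiplication gf16 with 19 as the polynom
-- 	arr = [
-- 		[0,0,0,0,0,0,0,0,0,0,0,0,0,0,0,0],
-- 		[0,1 ,2 ,3 ,4 ,5 ,6 ,7 ,8 ,9 ,10, 11 ,12 ,13 ,14 ,15],
-- 		[0,2 ,4 ,6 ,8 ,10 ,12 ,14 ,3 ,1 ,7 ,5 ,11 ,9 ,15 ,13],
-- 		[0,3 ,6 ,5 ,12 ,15 ,10 ,9 ,11 ,8 ,13 ,14 ,7 ,4 ,1 ,2],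
-- 		[0,4 ,8 ,12 ,3 ,7 ,11 ,15 ,6 ,2 ,14 ,10 ,5 ,1 ,13 ,9],
-- 		[0,5 ,10 ,15 ,7 ,2 ,13 ,8 ,14 ,11 ,4 ,1 ,9 ,12 ,3 ,6],
-- 		[0,6 ,12 ,10 ,11 ,13 ,7 ,1 ,5 ,3 ,9 ,15 ,14 ,8 ,2 ,4],
-- 		[0,7 ,14 ,9 ,15 ,8 ,1 ,6 ,13 ,10 ,3 ,4 ,2 ,5 ,12 ,11],
-- 		[0,8 ,3 ,11 ,6 ,14 ,5 ,13 ,12 ,4 ,15 ,7 ,10 ,2 ,9 ,1],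
-- 		[0,9 ,1 ,8 ,2 ,11 ,3 ,10 ,4 ,13 ,5 ,12 ,6 ,15 ,7 ,14],
-- 		[0,10 ,7 ,13 ,14 ,4 ,9 ,3 ,15 ,5 ,8 ,2 ,1 ,11 ,6 ,12],
-- 		[0,11 ,5 ,14 ,10 ,1 ,15 ,4 ,7 ,12 ,2 ,9 ,13 ,6 ,8 ,3],
-- 		[0,12 ,11 ,7 ,5 ,9 ,14 ,2 ,10 ,6 ,1 ,13 ,15 ,3 ,4 ,8],
-- 		[0,13 ,9 ,4 ,1 ,12 ,8 ,5 ,2 ,15 ,11 ,6 ,3 ,14 ,10 ,7],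
-- 		[0,14 ,15 ,1 ,13 ,3 ,2 ,12 ,9 ,7 ,6 ,8 ,4 ,10 ,11 ,5],
-- 		[0,15 ,13 ,2 ,9 ,6 ,4 ,11 ,1 ,14 ,12 ,3 ,8 ,7 ,5 ,10]
-- 	]
-- 	return arr[a][b]
--
-- def additionGF16(a,b): #return the value of addition gf16
-- 	arr = [
-- 		[0 ,1 ,2 ,3 ,4 ,5 ,6 ,7 ,8 ,9 ,10 ,11 ,12 ,13 ,14 ,15],
-- 		[1 ,0 ,3 ,2 ,5 ,4 ,7 ,6 ,9 ,8 ,11 ,10 ,13 ,12 ,15 ,14],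
-- 		[2 ,3 ,0 ,1 ,6 ,7 ,4 ,5 ,10 ,11 ,8 ,9 ,14 ,15 ,12 ,13],
-- 		[3 ,2 ,1 ,0 ,7 ,6 ,5 ,4 ,11 ,10 ,9 ,8 ,15 ,14 ,13 ,12],
-- 		[4 ,5 ,6 ,7 ,0 ,1 ,2 ,3 ,12 ,13 ,14 ,15 ,8 ,9 ,10 ,11],
-- 		[5 ,4 ,7 ,6 ,1 ,0 ,3 ,2 ,13 ,12 ,15 ,14 ,9 ,8 ,11 ,10],
-- 		[6 ,7 ,4 ,5 ,2 ,3 ,0 ,1 ,14 ,15 ,12 ,13 ,10 ,11 ,8 ,9],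
-- 		[7 ,6 ,5 ,4 ,3 ,2 ,1 ,0 ,15 ,14 ,13 ,12 ,11 ,10 ,9 ,8],
-- 		[8 ,9 ,10 ,11 ,12 ,13 ,14 ,15 ,0 ,1 ,2 ,3 ,4 ,5 ,6 ,7],
-- 		[9 ,8 ,11 ,10 ,13 ,12 ,15 ,14 ,1 ,0 ,3 ,2 ,5 ,4 ,7 ,6],
-- 		[10 ,11 ,8 ,9 ,14 ,15 ,12 ,13 ,2 ,3 ,0 ,1 ,6 ,7 ,4 ,5],
-- 		[11 ,10 ,9 ,8 ,15 ,14 ,13 ,12 ,3 ,2 ,1 ,0 ,7 ,6 ,5 ,4],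
-- 		[12 ,13 ,14 ,15 ,8 ,9 ,10 ,11 ,4 ,5 ,6 ,7 ,0 ,1 ,2 ,3],
-- 		[13 ,12 ,15 ,14 ,9 ,8 ,11 ,10 ,5 ,4 ,7 ,6 ,1 ,0 ,3 ,2],
-- 		[14 ,15 ,12 ,13 ,10 ,11 ,8 ,9 ,6 ,7 ,4 ,5 ,2 ,3 ,0 ,1],
-- 		[15 ,14 ,13 ,12 ,11 ,10 ,9 ,8 ,7 ,6 ,5 ,4 ,3 ,2 ,1 ,0]
-- 	]
-- 	return arr[a][b]
--
-- def mixRows(mtrixST): #mix rows in GF(16)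
-- 	M = [[1, 2, 6, 4], [2, 1, 4, 6], [6, 4, 1, 2], [4, 6, 2, 1]]
-- 	newTrix = [[0 for x in range(4)] for y in range(4)]
-- 	for i in range(0,4):
-- 		for j in range(0,4):
-- 			temp = multiplyGF16(mtrixST[i][0],M[0][j])
-- 			temp2 = multiplyGF16(mtrixST[i][1],M[1][j])
-- 			temp3 = multiplyGF16(mtrixST[i][2],M[2][j])
-- 			temp4 = multiplyGF16(mtrixST[i][3],M[3][j])
-- 			temp = additionGF16(temp,temp2)
-- 			temp = additionGF16(temp,temp3)
-- 			temp = additionGF16(temp,temp4)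
-- 			newTrix[i][j] = temp
--
-- 	return newTrix
-- ===== SOURCE B (Python) =====
-- def mixRows(mtrixST):  # mix rows in GF(16): exploit that M's columns are built from 1,2,4,6=2^4,
--     # so per row compute each element's double and quadruple once (xtime chain) and
--     # assemble the four outputs as XOR combinations -- no general multiply at all.
--     def xt(v):  # multiply by x in GF(2^4) mod x^4+x+1
--         v <<= 1
--         return v ^ 19 if v & 16 else v
--     out = []
--     for row in mtrixST[:4]:
--         a, b, c, d = (v & 15 for v in row[:4])
--         a2, b2, c2, d2 = xt(a), xt(b), xt(c), xt(d)
--         a4, b4, c4, d4 = xt(a2), xt(b2), xt(c2), xt(d2)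
--         out.append([a ^ b2 ^ (c2 ^ c4) ^ d4,
--                     a2 ^ b ^ c4 ^ (d2 ^ d4),
--                     (a2 ^ a4) ^ b4 ^ c ^ d2,
--                     a4 ^ (b2 ^ b4) ^ c2 ^ d])
--     return out
-- ===== Notes on version B (the rewrite author's own statement) =====
-- stated objective: alternative
-- what changed: Dropped both 16x16 lookup tables and any per-entry general multiply: since the fixed matrix only has coefficients 1,2,4,6, B computes each row element's double and quadruple once via an xtime chain (GF(2^4) mod x^4+x+1) and builds the four outputs as XOR combinations of those shared values, accumulating rows in one pass over mtrixST[:4].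
import Mathlib
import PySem

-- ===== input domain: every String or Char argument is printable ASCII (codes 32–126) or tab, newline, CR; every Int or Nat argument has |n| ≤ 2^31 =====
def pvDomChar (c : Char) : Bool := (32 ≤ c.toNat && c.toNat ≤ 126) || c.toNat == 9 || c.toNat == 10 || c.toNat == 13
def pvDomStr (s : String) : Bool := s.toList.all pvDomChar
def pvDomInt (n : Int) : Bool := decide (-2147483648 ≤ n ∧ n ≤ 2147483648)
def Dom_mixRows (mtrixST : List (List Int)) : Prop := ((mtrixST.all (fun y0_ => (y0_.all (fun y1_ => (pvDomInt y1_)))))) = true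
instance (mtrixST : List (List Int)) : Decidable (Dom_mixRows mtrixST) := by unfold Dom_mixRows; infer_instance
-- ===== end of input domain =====

-- B drops both 16×16 lookup tables and any general multiply: since M's coefficients are
-- only 1, 2, 4, 6, it computes each row element's double and quadruple once (an xtime chain
-- in GF(2^4) mod x^4+x+1) and assembles the four outputs as XOR combinations (objective: alternative).

-- ===== PORT A =====
def mulTableGF16 : List (List Int) := [
  [0,0,0,0,0,0,0,0,0,0,0,0,0,0,0,0],
  [0,1,2,3,4,5,6,7,8,9,10,11,12,13,14,15],
  [0,2,4,6,8,10,12,14,3,1,7,5,11,9,15,13],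
  [0,3,6,5,12,15,10,9,11,8,13,14,7,4,1,2],
  [0,4,8,12,3,7,11,15,6,2,14,10,5,1,13,9],
  [0,5,10,15,7,2,13,8,14,11,4,1,9,12,3,6],
  [0,6,12,10,11,13,7,1,5,3,9,15,14,8,2,4],
  [0,7,14,9,15,8,1,6,13,10,3,4,2,5,12,11],
  [0,8,3,11,6,14,5,13,12,4,15,7,10,2,9,1],
  [0,9,1,8,2,11,3,10,4,13,5,12,6,15,7,14],
  [0,10,7,13,14,4,9,3,15,5,8,2,1,11,6,12],
  [0,11,5,14,10,1,15,4,7,12,2,9,13,6,8,3],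
  [0,12,11,7,5,9,14,2,10,6,1,13,15,3,4,8],
  [0,13,9,4,1,12,8,5,2,15,11,6,3,14,10,7],
  [0,14,15,1,13,3,2,12,9,7,6,8,4,10,11,5],
  [0,15,13,2,9,6,4,11,1,14,12,3,8,7,5,10]]

def addTableGF16 : List (List Int) := [
  [0,1,2,3,4,5,6,7,8,9,10,11,12,13,14,15],
  [1,0,3,2,5,4,7,6,9,8,11,10,13,12,15,14],
  [2,3,0,1,6,7,4,5,10,11,8,9,14,15,12,13],
  [3,2,1,0,7,6,5,4,11,10,9,8,15,14,13,12],
  [4,5,6,7,0,1,2,3,12,13,14,15,8,9,10,11],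
  [5,4,7,6,1,0,3,2,13,12,15,14,9,8,11,10],
  [6,7,4,5,2,3,0,1,14,15,12,13,10,11,8,9],
  [7,6,5,4,3,2,1,0,15,14,13,12,11,10,9,8],
  [8,9,10,11,12,13,14,15,0,1,2,3,4,5,6,7],
  [9,8,11,10,13,12,15,14,1,0,3,2,5,4,7,6],
  [10,11,8,9,14,15,12,13,2,3,0,1,6,7,4,5],
  [11,10,9,8,15,14,13,12,3,2,1,0,7,6,5,4],
  [12,13,14,15,8,9,10,11,4,5,6,7,0,1,2,3],
  [13,12,15,14,9,8,11,10,5,4,7,6,1,0,3,2],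
  [14,15,12,13,10,11,8,9,6,7,4,5,2,3,0,1],
  [15,14,13,12,11,10,9,8,7,6,5,4,3,2,1,0]]

-- arr[a][b]; pyGetD is exact under Pre_ (all indices in range there)
def multiplyGF16 (a b : Int) : Int :=
  PySem.List.pyGetD (PySem.List.pyGetD mulTableGF16 a []) b 0

def additionGF16 (a b : Int) : Int :=
  PySem.List.pyGetD (PySem.List.pyGetD addTableGF16 a []) b 0

def mixRows (mtrixST : List (List Int)) : List (List Int) :=
  let M : List (List Int) := [[1, 2, 6, 4], [2, 1, 4, 6], [6, 4, 1, 2], [4, 6, 2, 1]]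
  let newTrix : List (List Int) :=
    (PySem.List.pyRange 0 4 1).map (fun _ => (PySem.List.pyRange 0 4 1).map (fun _ => (0 : Int)))
  (PySem.List.pyRange 0 4 1).foldl (fun nt i =>
    (PySem.List.pyRange 0 4 1).foldl (fun nt j =>
      let row := PySem.List.pyGetD mtrixST i []
      let temp := multiplyGF16 (PySem.List.pyGetD row 0 0) (PySem.List.pyGetD (PySem.List.pyGetD M 0 []) j 0)
      let temp2 := multiplyGF16 (PySem.List.pyGetD row 1 0) (PySem.List.pyGetD (PySem.List.pyGetD M 1 []) j 0)
      let temp3 := multiplyGF16 (PySem.List.pyGetD row 2 0) (PySem.List.pyGetD (PySem.List.pyGetD M 2 []) j 0)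
      let temp4 := multiplyGF16 (PySem.List.pyGetD row 3 0) (PySem.List.pyGetD (PySem.List.pyGetD M 3 []) j 0)
      let temp := additionGF16 temp temp2
      let temp := additionGF16 temp temp3
      let temp := additionGF16 temp temp4
      PySem.List.pySetD nt i (PySem.List.pySetD (PySem.List.pyGetD nt i []) j temp)) nt) newTrix

-- ===== PORT B =====
-- multiply by x in GF(2^4) mod x^4+x+1 (Source B's xt)
def xt (v : Int) : Int :=
  let v := v <<< 1
  if PySem.Int.band v 16 ≠ 0 then PySem.Int.bxor v 19 else v

-- the tuple unpack 'a,b,c,d = (v & 15 for v in row[:4])' becomes four indexed reads of row[:4]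
def mixRows_alt (mtrixST : List (List Int)) : List (List Int) :=
  (PySem.List.slice mtrixST none (some 4)).foldl (fun out row =>
    let r := PySem.List.slice row none (some 4)
    let a := PySem.Int.band (PySem.List.pyGetD r 0 0) 15
    let b := PySem.Int.band (PySem.List.pyGetD r 1 0) 15
    let c := PySem.Int.band (PySem.List.pyGetD r 2 0) 15
    let d := PySem.Int.band (PySem.List.pyGetD r 3 0) 15
    let a2 := xt a; let b2 := xt b; let c2 := xt c; let d2 := xt d
    let a4 := xt a2; let b4 := xt b2; let c4 := xt c2; let d4 := xt d2
    out ++ [[PySem.Int.bxor (PySem.Int.bxor (PySem.Int.bxor a b2) (PySem.Int.bxor c2 c4)) d4,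
             PySem.Int.bxor (PySem.Int.bxor (PySem.Int.bxor a2 b) c4) (PySem.Int.bxor d2 d4),
             PySem.Int.bxor (PySem.Int.bxor (PySem.Int.bxor (PySem.Int.bxor a2 a4) b4) c) d2,
             PySem.Int.bxor (PySem.Int.bxor (PySem.Int.bxor a4 (PySem.Int.bxor b2 b4)) c2) d]]) []

-- ===== PRECONDITION & SPEC =====
-- Pre_ excludes exactly the inputs on which A raises IndexError: matrices without a full
-- 4×4 top-left block, or with an entry there outside the index range -16..15 of the 16-row tables.
def Pre_mixRows (mtrixST : List (List Int)) : Prop :=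
  4 ≤ mtrixST.length ∧
  ∀ row ∈ mtrixST.take 4, 4 ≤ row.length ∧ ∀ x ∈ row.take 4, -16 ≤ x ∧ x < 16

instance (mtrixST : List (List Int)) : Decidable (Pre_mixRows mtrixST) := by
  unfold Pre_mixRows; infer_instance

def pvWitness_mixRows : List (List Int) :=
  [[0, 1, 2, 3], [4, 5, 6, 7], [8, 9, 10, 11], [12, 13, 14, 15]]

def Spec_mixRows (mtrixST : List (List Int)) (out : List (List Int)) : Prop := out = mixRows_alt mtrixST
instance (mtrixST : List (List Int)) (out : List (List Int)) : Decidable (Spec_mixRows mtrixST out) := by unfold Spec_mixRows; infer_instance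

-- ===== CLAIM (what is proved, stated in full; the proofs are below) =====
def Claim_equal_mixRows : Prop := ∀ (mtrixST : List (List Int)), Dom_mixRows mtrixST → Pre_mixRows mtrixST → Spec_mixRows mtrixST (mixRows mtrixST)

-- ===== LEMMAS AND PROOFS =====

-- pointwise over the 32 admissible indices: A's table columns 1,2,4,6 ARE the xtime chain of B
theorem mulConsts_nat : ∀ a : Nat, a < 32 →
    (multiplyGF16 ((a : Int) - 16) 1 = PySem.Int.band ((a : Int) - 16) 15 ∧
     multiplyGF16 ((a : Int) - 16) 2 = xt (PySem.Int.band ((a : Int) - 16) 15) ∧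
     multiplyGF16 ((a : Int) - 16) 4 = xt (xt (PySem.Int.band ((a : Int) - 16) 15)) ∧
     multiplyGF16 ((a : Int) - 16) 6 =
       PySem.Int.bxor (xt (PySem.Int.band ((a : Int) - 16) 15)) (xt (xt (PySem.Int.band ((a : Int) - 16) 15))) ∧
     0 ≤ multiplyGF16 ((a : Int) - 16) 1 ∧ multiplyGF16 ((a : Int) - 16) 1 < 16 ∧
     0 ≤ multiplyGF16 ((a : Int) - 16) 2 ∧ multiplyGF16 ((a : Int) - 16) 2 < 16 ∧
     0 ≤ multiplyGF16 ((a : Int) - 16) 4 ∧ multiplyGF16 ((a : Int) - 16) 4 < 16 ∧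
     0 ≤ multiplyGF16 ((a : Int) - 16) 6 ∧ multiplyGF16 ((a : Int) - 16) 6 < 16) := by
  decide

theorem mulConsts {a : Int} (ha0 : -16 ≤ a) (ha : a < 16) :
    (multiplyGF16 a 1 = PySem.Int.band a 15 ∧
     multiplyGF16 a 2 = xt (PySem.Int.band a 15) ∧
     multiplyGF16 a 4 = xt (xt (PySem.Int.band a 15)) ∧
     multiplyGF16 a 6 = PySem.Int.bxor (xt (PySem.Int.band a 15)) (xt (xt (PySem.Int.band a 15))) ∧
     0 ≤ multiplyGF16 a 1 ∧ multiplyGF16 a 1 < 16 ∧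
     0 ≤ multiplyGF16 a 2 ∧ multiplyGF16 a 2 < 16 ∧
     0 ≤ multiplyGF16 a 4 ∧ multiplyGF16 a 4 < 16 ∧
     0 ≤ multiplyGF16 a 6 ∧ multiplyGF16 a 6 < 16) := by
  have h1 : a = (((a + 16).toNat : Nat) : Int) - 16 := by omega
  rw [h1]
  exact mulConsts_nat (a + 16).toNat (by omega)

-- pointwise: the addition table IS xor on GF(16) elements, and stays inside 0..15
theorem addTable_eq_xor_nat : ∀ a : Nat, a < 16 → ∀ b : Nat, b < 16 →
    additionGF16 (a : Int) (b : Int) = PySem.Int.bxor (a : Int) (b : Int) ∧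
    0 ≤ additionGF16 (a : Int) (b : Int) ∧ additionGF16 (a : Int) (b : Int) < 16 := by decide

theorem addTable_eq_xor {a b : Int} (ha0 : 0 ≤ a) (ha : a < 16) (hb0 : 0 ≤ b) (hb : b < 16) :
    additionGF16 a b = PySem.Int.bxor a b ∧ 0 ≤ additionGF16 a b ∧ additionGF16 a b < 16 := by
  have h1 : a = ((a.toNat : Nat) : Int) := by omega
  have h2 : b = ((b.toNat : Nat) : Int) := by omega
  rw [h1, h2]
  exact addTable_eq_xor_nat a.toNat (by omega) b.toNat (by omega)

-- one output entry: A's chain of table lookups with coefficients c0..c3 ∈ {1,2,4,6}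
-- = the matching xor-combination in B, for any coefficient column of M
theorem entry_eq {x0 x1 x2 x3 : Int} (c0 c1 c2 c3 v0 v1 v2 v3 : Int)
    (e0 : multiplyGF16 x0 c0 = v0) (e1 : multiplyGF16 x1 c1 = v1)
    (e2 : multiplyGF16 x2 c2 = v2) (e3 : multiplyGF16 x3 c3 = v3)
    (r0 : 0 ≤ multiplyGF16 x0 c0 ∧ multiplyGF16 x0 c0 < 16)
    (r1 : 0 ≤ multiplyGF16 x1 c1 ∧ multiplyGF16 x1 c1 < 16)
    (r2 : 0 ≤ multiplyGF16 x2 c2 ∧ multiplyGF16 x2 c2 < 16)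
    (r3 : 0 ≤ multiplyGF16 x3 c3 ∧ multiplyGF16 x3 c3 < 16) :
    additionGF16 (additionGF16 (additionGF16 (multiplyGF16 x0 c0) (multiplyGF16 x1 c1))
        (multiplyGF16 x2 c2)) (multiplyGF16 x3 c3)
      = PySem.Int.bxor (PySem.Int.bxor (PySem.Int.bxor v0 v1) v2) v3 := by
  obtain ⟨q1, s1l, s1r⟩ := addTable_eq_xor r0.1 r0.2 r1.1 r1.2
  obtain ⟨q2, s2l, s2r⟩ := addTable_eq_xor s1l s1r r2.1 r2.2
  obtain ⟨q3, _, _⟩ := addTable_eq_xor s2l s2r r3.1 r3.2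
  rw [q3, q2, q1, e0, e1, e2, e3]

theorem getD0 {α : Type} (a : α) (l : List α) (d : α) : PySem.List.pyGetD (a::l) (0:Int) d = a := by simp [pysem]
theorem getD1 {α : Type} (a b : α) (l : List α) (d : α) : PySem.List.pyGetD (a::b::l) (1:Int) d = b := by simp [pysem]
theorem getD2 {α : Type} (a b c : α) (l : List α) (d : α) : PySem.List.pyGetD (a::b::c::l) (2:Int) d = c := by simp [pysem]
theorem getD3 {α : Type} (a b c e : α) (l : List α) (d : α) : PySem.List.pyGetD (a::b::c::e::l) (3:Int) d = e := by simp [pysem]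
theorem setD0 {α : Type} (a : α) (l : List α) (v : α) : PySem.List.pySetD (a::l) (0:Int) v = v::l := by simp [pysem, PySem.List.pySetD_of_nonneg]
theorem setD1 {α : Type} (a b : α) (l : List α) (v : α) : PySem.List.pySetD (a::b::l) (1:Int) v = a::v::l := by simp [pysem, PySem.List.pySetD_of_nonneg]
theorem setD2 {α : Type} (a b c : α) (l : List α) (v : α) : PySem.List.pySetD (a::b::c::l) (2:Int) v = a::b::v::l := by simp [pysem, PySem.List.pySetD_of_nonneg]
theorem setD3 {α : Type} (a b c e : α) (l : List α) (v : α) : PySem.List.pySetD (a::b::c::e::l) (3:Int) v = a::b::c::v::l := by simp [pysem, PySem.List.pySetD_of_nonneg]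
theorem slice4 {α : Type} (a b c e : α) (l : List α) : PySem.List.slice (a::b::c::e::l) none (some 4) = [a,b,c,e] := by simp [pysem, PySem.List.slice_to]

theorem exists_four_cons {α : Type} (xs : List α) (h : 4 ≤ xs.length) :
    ∃ a b c d t, xs = a :: b :: c :: d :: t := by
  match xs, h with
  | a :: b :: c :: d :: t, _ => exact ⟨a, b, c, d, t, rfl⟩

-- one row: A's four entries (column j of M feeds the j-th entry) = B's row of xor-combinations
theorem row_eq {x0 x1 x2 x3 : Int}
    (h0 : -16 ≤ x0 ∧ x0 < 16) (h1 : -16 ≤ x1 ∧ x1 < 16) (h2 : -16 ≤ x2 ∧ x2 < 16) (h3 : -16 ≤ x3 ∧ x3 < 16) :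
    (additionGF16 (additionGF16 (additionGF16 (multiplyGF16 x0 1) (multiplyGF16 x1 2)) (multiplyGF16 x2 6)) (multiplyGF16 x3 4)
       = PySem.Int.bxor (PySem.Int.bxor (PySem.Int.bxor (PySem.Int.band x0 15) (xt (PySem.Int.band x1 15))) (PySem.Int.bxor (xt (PySem.Int.band x2 15)) (xt (xt (PySem.Int.band x2 15))))) (xt (xt (PySem.Int.band x3 15)))) ∧
    (additionGF16 (additionGF16 (additionGF16 (multiplyGF16 x0 2) (multiplyGF16 x1 1)) (multiplyGF16 x2 4)) (multiplyGF16 x3 6)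
       = PySem.Int.bxor (PySem.Int.bxor (PySem.Int.bxor (xt (PySem.Int.band x0 15)) (PySem.Int.band x1 15)) (xt (xt (PySem.Int.band x2 15)))) (PySem.Int.bxor (xt (PySem.Int.band x3 15)) (xt (xt (PySem.Int.band x3 15))))) ∧
    (additionGF16 (additionGF16 (additionGF16 (multiplyGF16 x0 6) (multiplyGF16 x1 4)) (multiplyGF16 x2 1)) (multiplyGF16 x3 2)
       = PySem.Int.bxor (PySem.Int.bxor (PySem.Int.bxor (PySem.Int.bxor (xt (PySem.Int.band x0 15)) (xt (xt (PySem.Int.band x0 15)))) (xt (xt (PySem.Int.band x1 15)))) (PySem.Int.band x2 15)) (xt (PySem.Int.band x3 15))) ∧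
    (additionGF16 (additionGF16 (additionGF16 (multiplyGF16 x0 4) (multiplyGF16 x1 6)) (multiplyGF16 x2 2)) (multiplyGF16 x3 1)
       = PySem.Int.bxor (PySem.Int.bxor (PySem.Int.bxor (xt (xt (PySem.Int.band x0 15))) (PySem.Int.bxor (xt (PySem.Int.band x1 15)) (xt (xt (PySem.Int.band x1 15))))) (xt (PySem.Int.band x2 15))) (PySem.Int.band x3 15)) := by
  obtain ⟨m01, m02, m04, m06, p01a, p01b, p02a, p02b, p04a, p04b, p06a, p06b⟩ := mulConsts h0.1 h0.2
  obtain ⟨n01, n02, n04, n06, q01a, q01b, q02a, q02b, q04a, q04b, q06a, q06b⟩ := mulConsts h1.1 h1.2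
  obtain ⟨o01, o02, o04, o06, r01a, r01b, r02a, r02b, r04a, r04b, r06a, r06b⟩ := mulConsts h2.1 h2.2
  obtain ⟨s01, s02, s04, s06, t01a, t01b, t02a, t02b, t04a, t04b, t06a, t06b⟩ := mulConsts h3.1 h3.2
  refine ⟨?_, ?_, ?_, ?_⟩
  · exact entry_eq 1 2 6 4 _ _ _ _ m01 n02 o06 s04 ⟨p01a,p01b⟩ ⟨q02a,q02b⟩ ⟨r06a,r06b⟩ ⟨t04a,t04b⟩
  · exact entry_eq 2 1 4 6 _ _ _ _ m02 n01 o04 s06 ⟨p02a,p02b⟩ ⟨q01a,q01b⟩ ⟨r04a,r04b⟩ ⟨t06a,t06b⟩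
  · exact entry_eq 6 4 1 2 _ _ _ _ m06 n04 o01 s02 ⟨p06a,p06b⟩ ⟨q04a,q04b⟩ ⟨r01a,r01b⟩ ⟨t02a,t02b⟩
  · exact entry_eq 4 6 2 1 _ _ _ _ m04 n06 o02 s01 ⟨p04a,p04b⟩ ⟨q06a,q06b⟩ ⟨r02a,r02b⟩ ⟨t01a,t01b⟩

-- ===== VERDICT (by name: the statement is the Claim_ definition above) =====
set_option maxHeartbeats 2000000 in
theorem mixRows_spec : Claim_equal_mixRows := by
  intro m _ hpre
  obtain ⟨hlen, hrows⟩ := hpre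
  obtain ⟨r0, r1, r2, r3, t, rfl⟩ := exists_four_cons m hlen
  simp only [List.take, List.mem_cons, List.not_mem_nil, or_false, forall_eq_or_imp,
    forall_eq] at hrows
  obtain ⟨⟨l0, h0⟩, ⟨l1, h1⟩, ⟨l2, h2⟩, ⟨l3, h3⟩⟩ := hrows
  obtain ⟨a0, a1, a2, a3, t0, rfl⟩ := exists_four_cons r0 l0
  obtain ⟨b0, b1, b2, b3, t1, rfl⟩ := exists_four_cons r1 l1
  obtain ⟨c0, c1, c2, c3, t2, rfl⟩ := exists_four_cons r2 l2
  obtain ⟨d0, d1, d2, d3, t3, rfl⟩ := exists_four_cons r3 l3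
  simp only [List.take, List.mem_cons, List.not_mem_nil, or_false, forall_eq_or_imp,
    forall_eq] at h0 h1 h2 h3
  obtain ⟨ha0, ha1, ha2, ha3⟩ := h0
  obtain ⟨hb0, hb1, hb2, hb3⟩ := h1
  obtain ⟨hc0, hc1, hc2, hc3⟩ := h2
  obtain ⟨hd0, hd1, hd2, hd3⟩ := h3
  show mixRows _ = mixRows_alt _
  have hr : PySem.List.pyRange 0 4 1 = [0, 1, 2, 3] := by decide
  obtain ⟨ea0, ea1, ea2, ea3⟩ := row_eq ha0 ha1 ha2 ha3
  obtain ⟨eb0, eb1, eb2, eb3⟩ := row_eq hb0 hb1 hb2 hb3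
  obtain ⟨ec0, ec1, ec2, ec3⟩ := row_eq hc0 hc1 hc2 hc3
  obtain ⟨ed0, ed1, ed2, ed3⟩ := row_eq hd0 hd1 hd2 hd3
  simp only [mixRows, mixRows_alt, hr, List.foldl_cons, List.foldl_nil, List.map_cons,
    List.map_nil, getD0, getD1, getD2, getD3, setD0, setD1, setD2, setD3, slice4,
    List.nil_append, List.cons_append, List.cons.injEq]
  and_intros <;> trivial
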